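-- pv_equiv track=rewrite | github.com/ds-wizard/engine-backend-api-docs | scripts/versions.py | get_previous_version
-- ===== SOURCE A (Python) =====
-- def get_previous_version(current_version: (int, int, int), versions: [(int, int, int)]) -> (int, int, int):
--     # 1. Define variables
--     (current_major, current_minor, current_patch) = current_version
--     minors = sorted([minor for (_, minor, _) in versions], reverse=True)
--     patches = sorted([patch for (_, _, patch) in versions], reverse=True)
--
--     # 2. Try decrease patch
--     previous_version = (current_major, current_minor, current_patch - 1)
--     if previous_version in versions:
--         return previous_version
--
--     # 3. Try decrease minor
--     for patch in patches:
--         previous_version = (current_major, current_minor - 1, patch)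
--         if previous_version in versions:
--             return previous_version
--
--     # 4. Try decrease major
--     for minor in minors:
--         for patch in patches:
--             previous_version = (current_major - 1, minor, patch)
--             if previous_version in versions:
--                 return previous_version
--
--     return None
-- ===== SOURCE B (Python) =====
-- def get_previous_version(current_version: (int, int, int), versions: [(int, int, int)]) -> (int, int, int):
--     (major, minor, patch) = current_version
--
--     # 1. Try decrease patch
--     candidate = (major, minor, patch - 1)
--     if candidate in versions:
--         return candidate
--
--     # 2. Try decrease minor: largest patch among versions (major, minor - 1, *)
--     patches = [p for (mj, mn, p) in versions if mj == major and mn == minor - 1]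
--     if patches:
--         return (major, minor - 1, max(patches))
--
--     # 3. Try decrease major: lexicographically largest (minor, patch) among versions (major - 1, *, *)
--     pairs = [(mn, p) for (mj, mn, p) in versions if mj == major - 1]
--     if pairs:
--         best_minor = max(mn for (mn, _) in pairs)
--         best_patch = max(p for (mn, p) in pairs if mn == best_minor)
--         return (major - 1, best_minor, best_patch)
--
--     return None
-- ===== Notes on version B (the rewrite author's own statement) =====
-- stated objective: faster
-- what changed: Replaces A's generate-and-test (candidate tuples built from globally sorted minor/patch lists, each probed by list membership) with filter-and-reduce: one filter pass over the versions plus a max per rule.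
import Mathlib
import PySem

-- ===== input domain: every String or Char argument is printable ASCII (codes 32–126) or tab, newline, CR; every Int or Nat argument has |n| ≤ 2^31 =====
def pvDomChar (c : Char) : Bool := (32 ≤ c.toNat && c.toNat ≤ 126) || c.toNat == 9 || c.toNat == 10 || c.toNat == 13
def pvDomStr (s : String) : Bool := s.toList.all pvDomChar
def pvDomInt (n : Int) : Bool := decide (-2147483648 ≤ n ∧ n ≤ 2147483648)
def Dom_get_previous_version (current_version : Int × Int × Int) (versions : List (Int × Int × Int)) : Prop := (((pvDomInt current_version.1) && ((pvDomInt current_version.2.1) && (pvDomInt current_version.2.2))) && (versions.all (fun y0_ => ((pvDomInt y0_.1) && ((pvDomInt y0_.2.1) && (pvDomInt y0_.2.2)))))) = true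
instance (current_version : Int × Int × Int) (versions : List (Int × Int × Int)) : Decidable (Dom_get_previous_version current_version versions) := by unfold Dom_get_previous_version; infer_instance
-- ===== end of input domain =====

-- ===== PORT A =====
-- B replaces A's generate-and-test over sorted global minor/patch lists with one filter pass plus a max per rule (faster).
def get_previous_version (current_version : Int × Int × Int) (versions : List (Int × Int × Int)) : Option (Int × Int × Int) :=
  let current_major := current_version.1
  let current_minor := current_version.2.1
  let current_patch := current_version.2.2
  let minors := PySem.List.sorted (versions.map (fun v => v.2.1)) (fun x => x) true
  let patches := PySem.List.sorted (versions.map (fun v => v.2.2)) (fun x => x) true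
  -- 2. Try decrease patch
  let previous_version := (current_major, current_minor, current_patch - 1)
  if previous_version ∈ versions then some previous_version
  else
    -- 3. Try decrease minor ('for patch in patches: … return' = findSome?)
    match patches.findSome? (fun patch =>
        if (current_major, current_minor - 1, patch) ∈ versions then
          some (current_major, current_minor - 1, patch) else none) with
    | some r => some r
    | none =>
      -- 4. Try decrease major (nested for-loops with return = nested findSome?)
      minors.findSome? (fun minor =>
        patches.findSome? (fun patch =>
          if (current_major - 1, minor, patch) ∈ versions then
            some (current_major - 1, minor, patch) else none))

-- ===== PORT B =====
def get_previous_version_alt (current_version : Int × Int × Int) (versions : List (Int × Int × Int)) : Option (Int × Int × Int) :=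
  let major := current_version.1
  let minor := current_version.2.1
  let patch := current_version.2.2
  -- 1. Try decrease patch
  let candidate := (major, minor, patch - 1)
  if candidate ∈ versions then some candidate
  else
    -- 2. Try decrease minor: largest patch among versions (major, minor - 1, *)
    let patches := (versions.filter (fun v => v.1 == major && v.2.1 == minor - 1)).map (fun v => v.2.2)
    match PySem.List.max? patches (fun x => x) with
    | some mp => some (major, minor - 1, mp)
    | none =>
      -- 3. Try decrease major: lexicographically largest (minor, patch) among versions (major - 1, *, *)
      let pairs := (versions.filter (fun v => v.1 == major - 1)).map (fun v => (v.2.1, v.2.2))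
      match PySem.List.max? (pairs.map (fun q => q.1)) (fun x => x) with
      | none => none
      | some best_minor =>
        match PySem.List.max? ((pairs.filter (fun q => q.1 == best_minor)).map (fun q => q.2)) (fun x => x) with
        | some best_patch => some (major - 1, best_minor, best_patch)
        | none => none  -- unreachable: best_minor is the minor of some pair, so the filtered list is nonempty

-- ===== PRECONDITION & SPEC =====
def Spec_get_previous_version (current_version : Int × Int × Int) (versions : List (Int × Int × Int)) (out : Option (Int × Int × Int)) : Prop := out = get_previous_version_alt current_version versions
instance (current_version : Int × Int × Int) (versions : List (Int × Int × Int)) (out : Option (Int × Int × Int)) : Decidable (Spec_get_previous_version current_version versions out) := by unfold Spec_get_previous_version; infer_instance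

-- ===== CLAIM (what is proved, stated in full; the proofs are below) =====
def Claim_equal_get_previous_version : Prop := ∀ (current_version : Int × Int × Int) (versions : List (Int × Int × Int)), Dom_get_previous_version current_version versions → Spec_get_previous_version current_version versions (get_previous_version current_version versions)

-- ===== LEMMAS AND PROOFS =====

/-- A `findSome?` over a descending list returns the value at the largest element
    on which the function is `some`. -/
lemma findSome_desc {b : Type} (L : List Int) (h : Int → Option b)
    (hs : L.Pairwise (fun a c => c ≤ a)) (x : Int) (v : b)
    (hx : x ∈ L) (hv : h x = some v)
    (hmax : ∀ y ∈ L, (h y).isSome → y ≤ x) :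
    L.findSome? h = some v := by
  induction L with
  | nil => cases hx
  | cons a t ih =>
    rw [List.pairwise_cons] at hs
    rw [List.findSome?_cons]
    cases hha : h a with
    | some w =>
      have hax : a ≤ x := hmax a (List.mem_cons_self) (by simp [hha])
      have hxa : x ≤ a := by
        rcases List.mem_cons.mp hx with rfl | hxt
        · exact le_refl _
        · exact hs.1 x hxt
      have : a = x := le_antisymm hax hxa
      subst this
      rw [hha] at hv
      simpa using hv
    | none =>
      have hxt : x ∈ t := by
        rcases List.mem_cons.mp hx with rfl | hxt
        · rw [hha] at hv; cases hv
        · exact hxt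
      exact ih hs.2 hxt (fun y hy hsome => hmax y (List.mem_cons_of_mem _ hy) hsome)

/-- Membership of a triple in `versions` ↔ membership of its patch in B's filtered patch list. -/
lemma mem_patches_iff (versions : List (Int × Int × Int)) (a c q : Int) :
    q ∈ (versions.filter (fun v => v.1 == a && v.2.1 == c)).map (fun v => v.2.2) ↔
      (a, c, q) ∈ versions := by
  constructor
  · rintro hq
    rcases List.mem_map.mp hq with ⟨v, hv, rfl⟩
    rcases List.mem_filter.mp hv with ⟨hmem, hp⟩
    simp only [Bool.and_eq_true, beq_iff_eq] at hp
    obtain ⟨v1, v2, v3⟩ := v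
    simp only at hp
    rcases hp with ⟨rfl, rfl⟩
    exact hmem
  · intro hmem
    exact List.mem_map.mpr ⟨(a, c, q), List.mem_filter.mpr ⟨hmem, by simp⟩, rfl⟩

/-- Membership of a triple in `versions` ↔ membership of its (minor, patch) pair in B's pair list. -/
lemma mem_pairs_iff (versions : List (Int × Int × Int)) (a c q : Int) :
    (c, q) ∈ (versions.filter (fun v => v.1 == a)).map (fun v => (v.2.1, v.2.2)) ↔
      (a, c, q) ∈ versions := by
  constructor
  · rintro hq
    rcases List.mem_map.mp hq with ⟨v, hv, hvq⟩
    rcases List.mem_filter.mp hv with ⟨hmem, hp⟩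
    simp only [beq_iff_eq] at hp
    obtain ⟨v1, v2, v3⟩ := v
    simp only [Prod.mk.injEq] at hvq
    simp only at hp
    rcases hvq with ⟨rfl, rfl⟩
    subst hp
    exact hmem
  · intro hmem
    exact List.mem_map.mpr ⟨(a, c, q), List.mem_filter.mpr ⟨hmem, by simp⟩, rfl⟩

-- ===== VERDICT (by name: the statement is the Claim_ definition above) =====
theorem get_previous_version_spec : Claim_equal_get_previous_version := by
  intro cv versions _
  unfold Spec_get_previous_version get_previous_version get_previous_version_alt
  obtain ⟨M, m, p⟩ := cv
  simp only
  by_cases h1 : (M, m, p - 1) ∈ versions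
  · simp [h1]
  · simp only [h1, if_false]
    -- step 2/3: decrease minor
    cases h2 : PySem.List.max? ((versions.filter (fun v => v.1 == M && v.2.1 == m - 1)).map (fun v => v.2.2)) (fun x => x) with
    | some Q =>
      have hQmem : (M, m - 1, Q) ∈ versions :=
        (mem_patches_iff versions M (m - 1) Q).mp (PySem.List.max?_mem h2)
      have hA : (PySem.List.sorted (versions.map (fun v => v.2.2)) (fun x => x) true).findSome?
          (fun patch => if (M, m - 1, patch) ∈ versions then some (M, m - 1, patch) else none)
          = some (M, m - 1, Q) := by
        apply findSome_desc _ _ (PySem.List.sorted_pairwise_rev _ _) Q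
        · exact (PySem.List.mem_sorted _ _ _ _).mpr (List.mem_map.mpr ⟨(M, m - 1, Q), hQmem, rfl⟩)
        · simp [hQmem]
        · intro y _ hy
          by_cases hmem : (M, m - 1, y) ∈ versions
          · exact PySem.List.max?_isMax h2 y ((mem_patches_iff versions M (m - 1) y).mpr hmem)
          · simp [hmem] at hy
      rw [hA]
    | none =>
      have hnone : ∀ q : Int, (M, m - 1, q) ∉ versions := by
        intro q hq
        have := (mem_patches_iff versions M (m - 1) q).mpr hq
        rw [(PySem.List.max?_eq_none_iff _ _).mp h2] at this
        cases this
      have hA2 : (PySem.List.sorted (versions.map (fun v => v.2.2)) (fun x => x) true).findSome?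
          (fun patch => if (M, m - 1, patch) ∈ versions then some (M, m - 1, patch) else none)
          = none := by
        rw [List.findSome?_eq_none_iff]
        intro y _
        simp [hnone y]
      rw [hA2]
      -- step 3/4: decrease major
      cases h3 : PySem.List.max? (((versions.filter (fun v => v.1 == M - 1)).map (fun v => (v.2.1, v.2.2))).map (fun q => q.1)) (fun x => x) with
      | none =>
        have hpairs : (versions.filter (fun v => v.1 == M - 1)).map (fun v => (v.2.1, v.2.2)) = [] := by
          have := (PySem.List.max?_eq_none_iff _ _).mp h3
          simpa using this
        have hnone3 : ∀ c q : Int, (M - 1, c, q) ∉ versions := by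
          intro c q hq
          have := (mem_pairs_iff versions (M - 1) c q).mpr hq
          rw [hpairs] at this
          cases this
        have hA3 : (PySem.List.sorted (versions.map (fun v => v.2.1)) (fun x => x) true).findSome?
            (fun minor => (PySem.List.sorted (versions.map (fun v => v.2.2)) (fun x => x) true).findSome?
              (fun patch => if (M - 1, minor, patch) ∈ versions then some (M - 1, minor, patch) else none))
            = none := by
          rw [List.findSome?_eq_none_iff]
          intro c _
          rw [List.findSome?_eq_none_iff]
          intro q _
          simp [hnone3 c q]
        rw [hA3]
      | some bm =>
        -- the filtered patch list for bm is nonempty, so its max? is some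
        have hbm : bm ∈ ((versions.filter (fun v => v.1 == M - 1)).map (fun v => (v.2.1, v.2.2))).map (fun q => q.1) :=
          PySem.List.max?_mem h3
        rcases List.mem_map.mp hbm with ⟨pr, hpr, hpr1⟩
        have hne : ((((versions.filter (fun v => v.1 == M - 1)).map (fun v => (v.2.1, v.2.2))).filter (fun q => q.1 == bm)).map (fun q => q.2)) ≠ [] := by
          intro hnil
          have : pr.2 ∈ (((versions.filter (fun v => v.1 == M - 1)).map (fun v => (v.2.1, v.2.2))).filter (fun q => q.1 == bm)).map (fun q => q.2) :=
            List.mem_map.mpr ⟨pr, List.mem_filter.mpr ⟨hpr, by simp [hpr1]⟩, rfl⟩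
          rw [hnil] at this
          cases this
        cases h4 : PySem.List.max? ((((versions.filter (fun v => v.1 == M - 1)).map (fun v => (v.2.1, v.2.2))).filter (fun q => q.1 == bm)).map (fun q => q.2)) (fun x => x) with
        | none => exact absurd ((PySem.List.max?_eq_none_iff _ _).mp h4) hne
        | some bp =>
          -- (M-1, bm, bp) ∈ versions
          have hbp : bp ∈ (((versions.filter (fun v => v.1 == M - 1)).map (fun v => (v.2.1, v.2.2))).filter (fun q => q.1 == bm)).map (fun q => q.2) :=
            PySem.List.max?_mem h4
          rcases List.mem_map.mp hbp with ⟨pr2, hpr2, hpr21⟩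
          rcases List.mem_filter.mp hpr2 with ⟨hpr2mem, hpr2eq⟩
          simp only [beq_iff_eq] at hpr2eq
          have hbpmem : (M - 1, bm, bp) ∈ versions := by
            have : pr2 = (bm, bp) := by
              obtain ⟨x1, x2⟩ := pr2
              simp only at hpr2eq hpr21
              rw [hpr2eq, hpr21]
            rw [this] at hpr2mem
            exact (mem_pairs_iff versions (M - 1) bm bp).mp hpr2mem
          -- key facts about maximality
          have hmaxpair : ∀ c q : Int, (M - 1, c, q) ∈ versions → c ≤ bm := by
            intro c q hq
            have hcq := (mem_pairs_iff versions (M - 1) c q).mpr hq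
            exact PySem.List.max?_isMax h3 c (List.mem_map.mpr ⟨(c, q), hcq, rfl⟩)
          have hmaxp : ∀ q : Int, (M - 1, bm, q) ∈ versions → q ≤ bp := by
            intro q hq
            have hcq := (mem_pairs_iff versions (M - 1) bm q).mpr hq
            exact PySem.List.max?_isMax h4 q
              (List.mem_map.mpr ⟨(bm, q), List.mem_filter.mpr ⟨hcq, by simp⟩, rfl⟩)
          have hA4 : (PySem.List.sorted (versions.map (fun v => v.2.1)) (fun x => x) true).findSome?
              (fun minor => (PySem.List.sorted (versions.map (fun v => v.2.2)) (fun x => x) true).findSome?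
                (fun patch => if (M - 1, minor, patch) ∈ versions then some (M - 1, minor, patch) else none))
              = some (M - 1, bm, bp) := by
            apply findSome_desc _ _ (PySem.List.sorted_pairwise_rev _ _) bm
            · exact (PySem.List.mem_sorted _ _ _ _).mpr
                (List.mem_map.mpr ⟨(M - 1, bm, bp), hbpmem, rfl⟩)
            · -- inner findSome? at bm returns (M-1, bm, bp)
              apply findSome_desc _ _ (PySem.List.sorted_pairwise_rev _ _) bp
              · exact (PySem.List.mem_sorted _ _ _ _).mpr
                  (List.mem_map.mpr ⟨(M - 1, bm, bp), hbpmem, rfl⟩)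
              · simp [hbpmem]
              · intro y _ hy
                by_cases hmem : (M - 1, bm, y) ∈ versions
                · exact hmaxp y hmem
                · simp [hmem] at hy
            · intro c _ hc
              rw [Option.isSome_iff_exists] at hc
              rcases hc with ⟨w, hw⟩
              rcases List.exists_of_findSome?_eq_some hw with ⟨q, _, hq⟩
              by_cases hmem : (M - 1, c, q) ∈ versions
              · exact hmaxpair c q hmem
              · simp [hmem] at hq
          rw [hA4]
          simp [h4]
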